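-- pv_equiv track=rewrite | github.com/David070920/Licitatii | app/core/monitoring.py | _determine_overall_status
-- ===== SOURCE A (Python) =====
-- from typing import Dict, List, Optional, Any
--
-- def _determine_overall_status(checks: Dict[str, Any]) -> str:
--     """Determine overall pipeline status"""
--
--     statuses = [check.get('status', 'unknown') for check in checks.values()]
--
--     if 'critical' in statuses or 'error' in statuses:
--         return 'critical'
--     elif 'degraded' in statuses or 'stale' in statuses:
--         return 'degraded'
--     elif 'no_data' in statuses:
--         return 'warning'
--     else:
--         return 'healthy'
-- ===== SOURCE B (Python) =====
-- _RANK = {'critical': 3, 'error': 3, 'degraded': 2, 'stale': 2, 'no_data': 1}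
-- _LABEL = ['healthy', 'warning', 'degraded', 'critical']
--
-- def _determine_overall_status(checks):
--     """Determine overall pipeline status"""
--     worst = 0
--     for check in checks.values():
--         r = _RANK.get(check.get('status', 'unknown'), 0)
--         if r > worst:
--             worst = r
--     return _LABEL[worst]
-- ===== Notes on version B (the rewrite author's own statement) =====
-- stated objective: simpler
-- what changed: Replaces the materialised status list and the chain of ordered membership tests with a single pass that tracks the maximum severity rank (critical/error=3, degraded/stale=2, no_data=1, else 0) and maps the rank back to a label.
import Mathlib
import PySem

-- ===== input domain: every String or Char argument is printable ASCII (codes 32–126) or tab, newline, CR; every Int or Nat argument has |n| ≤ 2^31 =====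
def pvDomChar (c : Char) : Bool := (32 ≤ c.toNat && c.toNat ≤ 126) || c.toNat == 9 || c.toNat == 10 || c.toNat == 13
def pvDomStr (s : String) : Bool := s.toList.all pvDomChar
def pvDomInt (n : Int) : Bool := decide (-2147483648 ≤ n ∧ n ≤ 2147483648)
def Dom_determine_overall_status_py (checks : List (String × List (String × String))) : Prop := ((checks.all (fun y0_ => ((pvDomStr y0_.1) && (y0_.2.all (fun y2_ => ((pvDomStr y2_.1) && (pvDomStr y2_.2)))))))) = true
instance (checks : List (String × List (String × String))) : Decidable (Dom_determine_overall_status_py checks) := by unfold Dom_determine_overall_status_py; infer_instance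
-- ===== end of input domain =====

-- B replaces A's status list + ordered membership tests by one pass tracking the
-- maximum severity rank, mapped back to a label (objective: simpler decomposition).

-- ===== PORT A =====
def determine_overall_status_py (checks : List (String × List (String × String))) : String :=
  let statuses := (PySem.Dict.values (PySem.Dict.mk checks)).map
    (fun check => PySem.Dict.getD (PySem.Dict.mk check) "status" "unknown")
  if statuses.contains "critical" || statuses.contains "error" then "critical"
  else if statuses.contains "degraded" || statuses.contains "stale" then "degraded"
  else if statuses.contains "no_data" then "warning"
  else "healthy"

-- ===== PORT B =====
-- Source B's _RANK.get(s, 0)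
def pvRank (s : String) : Nat :=
  PySem.Dict.getD
    (PySem.Dict.mk [("critical", 3), ("error", 3), ("degraded", 2), ("stale", 2), ("no_data", 1)]) s 0

def determine_overall_status_py_alt (checks : List (String × List (String × String))) : String :=
  let worst := (PySem.Dict.values (PySem.Dict.mk checks)).foldl
    (fun w check =>
      let r := pvRank (PySem.Dict.getD (PySem.Dict.mk check) "status" "unknown")
      if r > w then r else w) 0
  -- _LABEL[worst]: worst is a Nat ≤ 3, so the index is always in range; getD is exact here
  ["healthy", "warning", "degraded", "critical"].getD worst "healthy"

-- ===== PRECONDITION & SPEC =====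
def Spec_determine_overall_status_py (checks : List (String × List (String × String))) (out : String) : Prop := out = determine_overall_status_py_alt checks
instance (checks : List (String × List (String × String))) (out : String) : Decidable (Spec_determine_overall_status_py checks out) := by unfold Spec_determine_overall_status_py; infer_instance

-- ===== CLAIM (what is proved, stated in full; the proofs are below) =====
def Claim_equal_determine_overall_status_py : Prop := ∀ (checks : List (String × List (String × String))), Dom_determine_overall_status_py checks → Spec_determine_overall_status_py checks (determine_overall_status_py checks)

-- ===== LEMMAS AND PROOFS =====

-- the max severity rank of a list of status strings (B's loop, over the status list)
def pvMaxr (l : List String) : Nat :=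
  l.foldl (fun w s => if pvRank s > w then pvRank s else w) 0

theorem pvRank_eq (s : String) :
    pvRank s = if s = "critical" then 3 else if s = "error" then 3
      else if s = "degraded" then 2 else if s = "stale" then 2
      else if s = "no_data" then 1 else 0 := by
  split_ifs with h1 h2 h3 h4 h5
  · subst h1; decide
  · subst h2; decide
  · subst h3; decide
  · subst h4; decide
  · subst h5; decide
  · have c1 : (("critical" : String) == s) = false := beq_eq_false_iff_ne.mpr (Ne.symm h1)
    have c2 : (("error" : String) == s) = false := beq_eq_false_iff_ne.mpr (Ne.symm h2)
    have c3 : (("degraded" : String) == s) = false := beq_eq_false_iff_ne.mpr (Ne.symm h3)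
    have c4 : (("stale" : String) == s) = false := beq_eq_false_iff_ne.mpr (Ne.symm h4)
    have c5 : (("no_data" : String) == s) = false := beq_eq_false_iff_ne.mpr (Ne.symm h5)
    simp [pvRank, PySem.Dict.getD, PySem.Dict.get?, List.find?, c1, c2, c3, c4, c5]

theorem pvStep_eq_max (w r : Nat) : (if r > w then r else w) = max w r := by
  split <;> omega

theorem pvFoldl_max_init (l : List String) (a : Nat) :
    l.foldl (fun w s => max w (pvRank s)) a
      = max a (l.foldl (fun w s => max w (pvRank s)) 0) := by
  induction l generalizing a with
  | nil => simp
  | cons s t ih =>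
      simp only [List.foldl_cons]
      rw [ih (max a (pvRank s)), ih (max 0 (pvRank s))]
      omega

theorem pvMaxr_cons (s : String) (t : List String) :
    pvMaxr (s :: t) = max (pvRank s) (pvMaxr t) := by
  simp only [pvMaxr, List.foldl_cons, pvStep_eq_max]
  rw [pvFoldl_max_init]
  omega

theorem pvMem_le_maxr (s : String) (l : List String) (h : s ∈ l) : pvRank s ≤ pvMaxr l := by
  induction l with
  | nil => cases h
  | cons x t ih =>
      rw [pvMaxr_cons]
      rcases List.mem_cons.mp h with h | h
      · subst h; omega
      · have := ih h; omega

theorem pvMaxr_le (l : List String) (k : Nat) (h : ∀ s ∈ l, pvRank s ≤ k) : pvMaxr l ≤ k := by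
  induction l with
  | nil => simp [pvMaxr]
  | cons x t ih =>
      rw [pvMaxr_cons]
      have h1 := h x (by simp)
      have h2 := ih (fun s hs => h s (by simp [hs]))
      omega

theorem pvChain_eq (l : List String) :
    (if l.contains "critical" || l.contains "error" then "critical"
     else if l.contains "degraded" || l.contains "stale" then "degraded"
     else if l.contains "no_data" then "warning"
     else "healthy")
    = ["healthy", "warning", "degraded", "critical"].getD (pvMaxr l) "healthy" := by
  have hle : pvMaxr l ≤ 3 :=
    pvMaxr_le l 3 (fun s _ => by rw [pvRank_eq]; split_ifs <;> omega)
  split_ifs with h1 h2 h3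
  · -- critical or error present → maxr = 3
    simp only [Bool.or_eq_true, List.contains_eq_mem, decide_eq_true_eq] at h1
    have h3' : 3 ≤ pvMaxr l := by
      rcases h1 with h | h
      · have := pvMem_le_maxr _ _ h
        rw [show pvRank "critical" = 3 from by decide] at this; exact this
      · have := pvMem_le_maxr _ _ h
        rw [show pvRank "error" = 3 from by decide] at this; exact this
    rw [show pvMaxr l = 3 by omega]; decide
  · -- degraded or stale present, no critical/error → maxr = 2
    simp only [Bool.or_eq_true, List.contains_eq_mem, decide_eq_true_eq, not_or] at h1 h2
    have hub : pvMaxr l ≤ 2 := pvMaxr_le l 2 (fun s hs => by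
      rw [pvRank_eq]
      split_ifs with c1 c2 <;> try omega
      · exact absurd (c1 ▸ hs) h1.1
      · exact absurd (c2 ▸ hs) h1.2)
    have hlb : 2 ≤ pvMaxr l := by
      rcases h2 with h | h
      · have := pvMem_le_maxr _ _ h
        rw [show pvRank "degraded" = 2 from by decide] at this; exact this
      · have := pvMem_le_maxr _ _ h
        rw [show pvRank "stale" = 2 from by decide] at this; exact this
    rw [show pvMaxr l = 2 by omega]; decide
  · -- no_data present, nothing above → maxr = 1
    simp only [Bool.or_eq_true, List.contains_eq_mem, decide_eq_true_eq, not_or] at h1 h2 h3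
    have hub : pvMaxr l ≤ 1 := pvMaxr_le l 1 (fun s hs => by
      rw [pvRank_eq]
      split_ifs with c1 c2 c3 c4 <;> try omega
      · exact absurd (c1 ▸ hs) h1.1
      · exact absurd (c2 ▸ hs) h1.2
      · exact absurd (c3 ▸ hs) h2.1
      · exact absurd (c4 ▸ hs) h2.2)
    have hlb : 1 ≤ pvMaxr l := by
      have := pvMem_le_maxr _ _ h3
      rw [show pvRank "no_data" = 1 from by decide] at this; exact this
    rw [show pvMaxr l = 1 by omega]; decide
  · -- nothing present → maxr = 0
    simp only [Bool.or_eq_true, List.contains_eq_mem, decide_eq_true_eq, not_or] at h1 h2 h3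
    have hub : pvMaxr l ≤ 0 := pvMaxr_le l 0 (fun s hs => by
      rw [pvRank_eq]
      split_ifs with c1 c2 c3 c4 c5 <;> try omega
      · exact absurd (c1 ▸ hs) h1.1
      · exact absurd (c2 ▸ hs) h1.2
      · exact absurd (c3 ▸ hs) h2.1
      · exact absurd (c4 ▸ hs) h2.2
      · exact absurd (c5 ▸ hs) h3)
    rw [show pvMaxr l = 0 by omega]; decide

theorem pvAlt_eq_label (checks : List (String × List (String × String))) :
    determine_overall_status_py_alt checks
      = ["healthy", "warning", "degraded", "critical"].getD
          (pvMaxr ((PySem.Dict.values (PySem.Dict.mk checks)).map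
            (fun check => PySem.Dict.getD (PySem.Dict.mk check) "status" "unknown"))) "healthy" := by
  simp [determine_overall_status_py_alt, pvMaxr, List.foldl_map]

-- ===== VERDICT (by name: the statement is the Claim_ definition above) =====
theorem determine_overall_status_py_spec : Claim_equal_determine_overall_status_py := by
  intro checks _
  unfold Spec_determine_overall_status_py
  rw [pvAlt_eq_label]
  exact pvChain_eq _
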